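-- pv_equiv track=rewrite | github.com/Stiletti/python | love_calculator.py | checkTrue
-- ===== SOURCE A (Python) =====
-- def checkTrue(name, check1, check2):
--     score = 0
--     for i in name:
--         for j in check1:
--             if i == j:
--                 score += 1
--         for k in check2:
--             if i == k:
--                 score += 1
--     return score
-- ===== SOURCE B (Python) =====
-- def checkTrue(name, check1, check2):
--     cn = {}
--     for ch in name:
--         cn[ch] = cn.get(ch, 0) + 1
--     score = 0
--     for ch in check1:
--         score += cn.get(ch, 0)
--     for ch in check2:
--         score += cn.get(ch, 0)
--     return score
-- ===== Notes on version B (the rewrite author's own statement) =====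
-- stated objective: faster
-- what changed: B builds a frequency dict of name in one pass and then sums lookups while iterating over check1 and check2, replacing A's nested rescans of the check strings for every character of name.
import Mathlib
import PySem

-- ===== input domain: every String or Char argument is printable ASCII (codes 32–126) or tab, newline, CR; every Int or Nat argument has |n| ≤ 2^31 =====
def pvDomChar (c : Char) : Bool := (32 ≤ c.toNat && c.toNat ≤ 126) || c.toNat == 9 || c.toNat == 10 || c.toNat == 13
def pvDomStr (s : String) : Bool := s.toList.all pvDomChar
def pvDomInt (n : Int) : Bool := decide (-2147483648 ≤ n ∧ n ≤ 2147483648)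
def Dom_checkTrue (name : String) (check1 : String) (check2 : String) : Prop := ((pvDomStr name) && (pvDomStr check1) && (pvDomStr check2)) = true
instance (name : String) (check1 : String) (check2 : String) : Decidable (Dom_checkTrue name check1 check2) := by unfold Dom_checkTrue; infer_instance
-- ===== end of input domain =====

-- B replaces A's nested rescans by a one-pass frequency dict of name plus lookups while
-- iterating over the check strings (alternative algorithm; timing measured separately).

-- ===== PORT A =====
def checkTrue (name : String) (check1 : String) (check2 : String) : Int :=
  name.toList.foldl (fun score i =>
    let score := check1.toList.foldl (fun s j => if i == j then s + 1 else s) score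
    check2.toList.foldl (fun s k => if i == k then s + 1 else s) score) 0

-- ===== PORT B =====
def checkTrue_alt (name : String) (check1 : String) (check2 : String) : Int :=
  let cn : PySem.Dict Char Int :=
    name.toList.foldl (fun d ch => d.insert ch (d.getD ch 0 + 1)) PySem.Dict.empty
  let score := check1.toList.foldl (fun s ch => s + cn.getD ch 0) 0
  check2.toList.foldl (fun s ch => s + cn.getD ch 0) score

-- ===== PRECONDITION & SPEC =====
def Spec_checkTrue (name : String) (check1 : String) (check2 : String) (out : Int) : Prop := out = checkTrue_alt name check1 check2
instance (name : String) (check1 : String) (check2 : String) (out : Int) : Decidable (Spec_checkTrue name check1 check2 out) := by unfold Spec_checkTrue; infer_instance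

-- ===== CLAIM (what is proved, stated in full; the proofs are below) =====
def Claim_equal_checkTrue : Prop := ∀ (name : String) (check1 : String) (check2 : String), Dom_checkTrue name check1 check2 → Spec_checkTrue name check1 check2 (checkTrue name check1 check2)

-- ===== LEMMAS AND PROOFS =====

-- inner scan of A: counting matches of v in l, starting from accumulator a
theorem fold_count (v : Char) (l : List Char) (a : Int) :
    l.foldl (fun s j => if v == j then s + 1 else s) a = a + (l.count v : Int) := by
  induction l generalizing a with
  | nil => simp
  | cons y l ih =>
    simp only [List.foldl_cons]
    by_cases h : v = y
    · subst h
      simp only [beq_self_eq_true, if_true, ih, List.count_cons_self]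
      push_cast
      ring
    · have h' : (v == y) = false := by simp [h]
      rw [h', if_neg (by simp), ih]
      simp [List.count_cons, Ne.symm h]

-- outer loop of A as a sum over name
theorem checkTrue_eq_sum (name check1 check2 : String) :
    checkTrue name check1 check2 =
      (name.toList.map (fun i => ((check1.toList.count i : Int) + (check2.toList.count i : Int)))).sum := by
  unfold checkTrue
  have key : ∀ (l : List Char) (a : Int),
      l.foldl (fun score i =>
        let score := check1.toList.foldl (fun s j => if i == j then s + 1 else s) score
        check2.toList.foldl (fun s k => if i == k then s + 1 else s) score) a
      = a + (l.map (fun i => ((check1.toList.count i : Int) + (check2.toList.count i : Int)))).sum := by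
    intro l
    induction l with
    | nil => simp
    | cons x l ih =>
      intro a
      rw [List.foldl_cons, ih]
      simp only [fold_count, List.map_cons, List.sum_cons]
      ring
  rw [key]; ring

-- indicator sum over m equals count
theorem sum_map_ind (m : List Char) (x : Char) :
    (m.map (fun j => if j == x then (1 : Int) else 0)).sum = (m.count x : Int) := by
  induction m with
  | nil => simp
  | cons y m ih =>
    simp only [List.map_cons, List.sum_cons, ih, List.count_cons]
    by_cases h : y = x
    · simp only [h, beq_self_eq_true, if_true]
      push_cast
      ring
    · simp [h]

-- symmetry of the cross-count sum
theorem sum_count_comm (l m : List Char) :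
    (l.map (fun i => (m.count i : Int))).sum = (m.map (fun j => (l.count j : Int))).sum := by
  induction l with
  | nil => simp
  | cons x l ih =>
    simp only [List.map_cons, List.sum_cons, ih, List.count_cons]
    have h : (m.map (fun j => ((l.count j + if x == j then 1 else 0 : Nat) : Int))).sum
        = (m.map (fun j => (l.count j : Int) + if j == x then (1 : Int) else 0)).sum := by
      congr 1
      apply List.map_congr_left
      intro j _
      by_cases hx : j = x
      · simp only [hx, beq_self_eq_true, if_true]
        push_cast
        ring
      · have hx' : ¬ x = j := fun e => hx e.symm
        simp [hx, hx']
    rw [h, List.sum_map_add, sum_map_ind]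
    ring

theorem checkTrue_alt_eq_sum (name check1 check2 : String) :
    checkTrue_alt name check1 check2 =
      (check1.toList.map (fun j => (name.toList.count j : Int))).sum
        + (check2.toList.map (fun j => (name.toList.count j : Int))).sum := by
  unfold checkTrue_alt
  rw [PySem.List.foldl_add, PySem.List.foldl_add]
  simp only [PySem.Dict.getD_foldl_insert_add_one]
  have h : ∀ (s : String),
      (s.toList.map (fun ch => (PySem.Dict.empty : PySem.Dict Char Int).getD ch 0 + (name.toList.count ch : Int))).sum
      = (s.toList.map (fun j => (name.toList.count j : Int))).sum := by
    intro s; congr 1; apply List.map_congr_left; intro j _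
    simp [PySem.Dict.getD, PySem.Dict.empty, PySem.Dict.get?]
  rw [h, h]; ring

-- ===== VERDICT (by name: the statement is the Claim_ definition above) =====
theorem checkTrue_spec : Claim_equal_checkTrue := by
  intro name check1 check2 _
  unfold Spec_checkTrue
  rw [checkTrue_eq_sum, checkTrue_alt_eq_sum]
  have h : (name.toList.map (fun i => ((check1.toList.count i : Int) + (check2.toList.count i : Int)))).sum
      = (name.toList.map (fun i => (check1.toList.count i : Int))).sum
        + (name.toList.map (fun i => (check2.toList.count i : Int))).sum := List.sum_map_add
  rw [h, sum_count_comm name.toList check1.toList, sum_count_comm name.toList check2.toList]
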